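-- pv_equiv track=rewrite | github.com/SandyBridge101/A2sv | programming solutions 2/maximal_AND.py | solve
-- ===== SOURCE A (Python) =====
-- def solve(nums, k):
--     i = 30
--     while i >= 0 and k > 0:
--         count = 0
--         for num in nums:
--             if num & (1 << i) == 0:
--                 count += 1
--
--         if count <= k:
--             k -= count
--             for j in range(len(nums)):
--                 nums[j] |= (1 << i)
--
--         i -= 1
--
--     ans = nums[0]
--     for i in range(1, len(nums)):
--         ans &= nums[i]
--
--     return ans
-- ===== SOURCE B (Python) =====
-- def solve(nums, k):
--     # One counting pass over nums builds counts[b] = #elements with bit b clear;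
--     # the greedy then reads the table, and the mask is OR-ed into nums once at the end.
--     counts = [0] * 31
--     for num in nums:
--         counts = [counts[b] + (1 if num & (1 << b) == 0 else 0) for b in range(31)]
--     mask = 0
--     i = 30
--     while i >= 0 and k > 0:
--         if counts[i] <= k:
--             k -= counts[i]
--             mask |= 1 << i
--         i -= 1
--     for j in range(len(nums)):
--         nums[j] |= mask
--     ans = nums[0]
--     for j in range(1, len(nums)):
--         ans &= nums[j]
--     return ans
-- ===== Notes on version B (the rewrite author's own statement) =====
-- stated objective: alternative
-- what changed: B replaces A's per-bit rescans and per-bit in-place mutations with one counting pass that builds a counts table, a table-driven greedy that accumulates a single mask, and one final OR pass; the return value is proved equal via the invariance of per-bit counts under OR-ing in higher bits.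
import Mathlib
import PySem

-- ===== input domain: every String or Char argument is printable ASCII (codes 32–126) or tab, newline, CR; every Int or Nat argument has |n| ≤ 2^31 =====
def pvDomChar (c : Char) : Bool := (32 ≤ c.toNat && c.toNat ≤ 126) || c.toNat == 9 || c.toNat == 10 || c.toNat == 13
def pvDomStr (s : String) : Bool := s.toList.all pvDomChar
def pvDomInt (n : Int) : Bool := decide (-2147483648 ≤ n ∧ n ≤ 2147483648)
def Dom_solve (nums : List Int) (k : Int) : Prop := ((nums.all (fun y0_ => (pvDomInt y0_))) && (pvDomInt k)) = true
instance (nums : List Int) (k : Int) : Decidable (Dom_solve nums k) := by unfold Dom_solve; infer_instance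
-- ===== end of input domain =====

-- B restructures A (one counting pass building a table, a table-driven greedy accumulating a
-- single mask, one final OR pass) without changing the return value; both versions mutate
-- `nums` in place the same way (each element ends OR-ed with the same chosen bits), and the
-- equivalence proved here is about the return value.

-- Python's `1 << i` (i : Nat here since i runs over 30..0)
def pow2 (n : Nat) : Int := (1 : Int) <<< (n : Int)

-- ===== PORT A =====
-- the `while i >= 0 and k > 0` loop, fuel n = i+1 (so fuel 31 starts at i = 30)
def solveLoopA : Nat → List Int → Int → List Int
  | 0, nums, _ => nums
  | n + 1, nums, k =>
    if k > 0 then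
      let count := nums.foldl (fun c num => if Int.land num (pow2 n) = 0 then c + 1 else c) 0
      if count ≤ k then
        solveLoopA n (nums.map (fun x => Int.lor x (pow2 n))) (k - count)
      else
        solveLoopA n nums k
    else nums

def solve (nums : List Int) (k : Int) : Int :=
  let nums' := solveLoopA 31 nums k
  let ans := (PySem.List.pyGet? nums' 0).getD 0   -- nums[0]; IndexError on [] excluded by Pre_
  (nums'.drop 1).foldl (fun a x => Int.land a x) ans   -- for i in range(1, len(nums)): ans &= nums[i]

-- ===== PORT B =====
-- counts = [0]*31; for num in nums: counts = [counts[b] + (1 if num & (1<<b) == 0 else 0) for b in range(31)]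
def solveCounts (nums : List Int) : List Int :=
  nums.foldl
    (fun counts num =>
      (List.range 31).map (fun b => counts.getD b 0 + if Int.land num (pow2 b) = 0 then 1 else 0))
    (List.replicate 31 0)

-- the greedy over the table, fuel n = i+1
def solveLoopB : Nat → List Int → Int → Int → Int
  | 0, _, _, mask => mask
  | n + 1, counts, k, mask =>
    if k > 0 then
      let c := counts.getD n 0
      if c ≤ k then solveLoopB n counts (k - c) (Int.lor mask (pow2 n))
      else solveLoopB n counts k mask
    else mask

def solve_alt (nums : List Int) (k : Int) : Int :=
  let counts := solveCounts nums
  let mask := solveLoopB 31 counts k 0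
  let nums' := nums.map (fun x => Int.lor x mask)
  let ans := (PySem.List.pyGet? nums' 0).getD 0
  (nums'.drop 1).foldl (fun a x => Int.land a x) ans

-- ===== PRECONDITION & SPEC =====
-- Pre_ excludes only the empty list, on which A raises IndexError at nums[0].
def Pre_solve (nums : List Int) (k : Int) : Prop := nums ≠ []
instance (nums : List Int) (k : Int) : Decidable (Pre_solve nums k) := by unfold Pre_solve; infer_instance
def pvWitness_solve : List Int × Int := ([3, 5, 9], 2)

def Spec_solve (nums : List Int) (k : Int) (out : Int) : Prop := out = solve_alt nums k
instance (nums : List Int) (k : Int) (out : Int) : Decidable (Spec_solve nums k out) := by unfold Spec_solve; infer_instance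

-- ===== CLAIM (what is proved, stated in full; the proofs are below) =====
def Claim_equal_solve : Prop := ∀ (nums : List Int) (k : Int), Dom_solve nums k → Pre_solve nums k → Spec_solve nums k (solve nums k)

-- ===== LEMMAS AND PROOFS =====

theorem int_testBit_negSucc (a : Nat) (i : Nat) : (Int.negSucc a).testBit i = !(a.testBit i) := rfl

theorem int_testBit_ofNat (a : Nat) (i : Nat) : (Int.ofNat a).testBit i = a.testBit i := rfl

theorem int_ext_testBit {m n : Int} (h : ∀ i, m.testBit i = n.testBit i) : m = n := by
  cases m with
  | ofNat a =>
    cases n with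
    | ofNat b =>
      have : a = b := Nat.eq_of_testBit_eq (fun i => by
        have := h i; simpa [int_testBit_ofNat] using this)
      simp [this]
    | negSucc b =>
      exfalso
      have h1 : a.testBit (a + b) = false :=
        Nat.testBit_lt_two_pow (lt_of_lt_of_le a.lt_two_pow_self (Nat.pow_le_pow_right (by omega) (by omega)))
      have h2 : b.testBit (a + b) = false :=
        Nat.testBit_lt_two_pow (lt_of_lt_of_le b.lt_two_pow_self (Nat.pow_le_pow_right (by omega) (by omega)))
      have := h (a + b)
      rw [int_testBit_ofNat, int_testBit_negSucc, h1, h2] at this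
      simp at this
  | negSucc a =>
    cases n with
    | ofNat b =>
      exfalso
      have h1 : a.testBit (a + b) = false :=
        Nat.testBit_lt_two_pow (lt_of_lt_of_le a.lt_two_pow_self (Nat.pow_le_pow_right (by omega) (by omega)))
      have h2 : b.testBit (a + b) = false :=
        Nat.testBit_lt_two_pow (lt_of_lt_of_le b.lt_two_pow_self (Nat.pow_le_pow_right (by omega) (by omega)))
      have := h (a + b)
      rw [int_testBit_ofNat, int_testBit_negSucc, h1, h2] at this
      simp at this
    | negSucc b =>
      have : a = b := Nat.eq_of_testBit_eq (fun i => by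
        have := h i; rw [int_testBit_negSucc, int_testBit_negSucc] at this
        simpa using this)
      simp [this]

theorem pow2_eq (n : Nat) : pow2 n = ((2 ^ n : Nat) : Int) := Int.one_shiftLeft n

theorem testBit_pow2 (n i : Nat) : (pow2 n).testBit i = decide (n = i) := by
  rw [pow2_eq]
  show (Int.ofNat (2 ^ n)).testBit i = decide (n = i)
  rw [int_testBit_ofNat, Nat.testBit_two_pow]

theorem int_lor_zero (x : Int) : Int.lor x 0 = x := by
  apply int_ext_testBit
  intro i
  rw [Int.testBit_lor]
  show (x.testBit i || (Int.ofNat 0).testBit i) = x.testBit i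
  rw [int_testBit_ofNat, Nat.zero_testBit, Bool.or_false]

theorem int_lor_assoc (x m p : Int) : Int.lor (Int.lor x m) p = Int.lor x (Int.lor m p) := by
  apply int_ext_testBit
  intro i
  simp only [Int.testBit_lor, Bool.or_assoc]

-- OR-ing in a mask whose bit n is clear does not change bit n
theorem toggle_lemma (x m : Int) (n : Nat) (hm : m.testBit n = false) :
    Int.land (Int.lor x m) (pow2 n) = Int.land x (pow2 n) := by
  apply int_ext_testBit
  intro i
  simp only [Int.testBit_land, Int.testBit_lor, testBit_pow2]
  by_cases h : n = i
  · subst h; rw [hm]; simp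
  · simp [h]

-- step functions for counting a single bit
def cntStep (n : Nat) : Int → Int → Int := fun c num => if Int.land num (pow2 n) = 0 then c + 1 else c

def cnt (nums : List Int) (n : Nat) : Int := nums.foldl (cntStep n) 0

theorem cnt_shift (nums : List Int) (n : Nat) : ∀ c : Int, nums.foldl (cntStep n) c = c + cnt nums n := by
  induction nums with
  | nil => intro c; simp [cnt]
  | cons x xs ih =>
    intro c
    show xs.foldl (cntStep n) (cntStep n c x) = c + cnt (x :: xs) n
    rw [ih]
    have h2 : cnt (x :: xs) n = cntStep n 0 x + cnt xs n := by
      show xs.foldl (cntStep n) (cntStep n 0 x) = _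
      rw [ih]
    rw [h2]
    unfold cntStep
    split_ifs <;> ring

theorem counts_getD (nums : List Int) (n : Nat) (hn : n < 31) :
    (solveCounts nums).getD n 0 = cnt nums n := by
  unfold solveCounts
  suffices h : ∀ (l : List Int) (cs : List Int),
      (l.foldl (fun counts num =>
        (List.range 31).map (fun b => counts.getD b 0 + if Int.land num (pow2 b) = 0 then 1 else 0)) cs).getD n 0
      = cs.getD n 0 + cnt l n by
    rw [h]
    have hz : (List.replicate 31 (0:Int)).getD n 0 = 0 := by
      interval_cases n <;> rfl
    rw [hz, zero_add]
  intro l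
  induction l with
  | nil => intro cs; simp [cnt]
  | cons x xs ih =>
    intro cs
    rw [List.foldl_cons, ih]
    have hmap : ((List.range 31).map
        (fun b => cs.getD b 0 + if Int.land x (pow2 b) = 0 then 1 else 0)).getD n 0
        = cs.getD n 0 + if Int.land x (pow2 n) = 0 then 1 else 0 := by
      rw [List.getD_eq_getElem?_getD, List.getElem?_map, List.getElem?_range hn]
      rfl
    rw [hmap]
    have hc : cnt (x :: xs) n = (if Int.land x (pow2 n) = 0 then 1 else 0) + cnt xs n := by
      show xs.foldl (cntStep n) (cntStep n 0 x) = _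
      rw [cnt_shift]
      unfold cntStep
      split_ifs <;> ring
    rw [hc]
    ring

-- the main loop correspondence: A's loop over masked elements vs B's table-driven greedy
theorem loop_corr (nums : List Int) : ∀ (n : Nat), n ≤ 31 → ∀ (k m : Int),
    (∀ j, j < n → m.testBit j = false) →
    solveLoopA n (nums.map (fun x => Int.lor x m)) k
      = nums.map (fun x => Int.lor x (solveLoopB n (solveCounts nums) k m)) := by
  intro n
  induction n with
  | zero => intro _ k m _; rfl
  | succ n ih =>
    intro hn k m hm
    rw [solveLoopA, solveLoopB]
    by_cases hk : k > 0
    · simp only [hk, if_true]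
      have hcount :
          (nums.map (fun x => Int.lor x m)).foldl
            (fun c num => if Int.land num (pow2 n) = 0 then c + 1 else c) 0
          = (solveCounts nums).getD n 0 := by
        rw [counts_getD nums n (by omega), List.foldl_map]
        show (nums.foldl (fun c x => if Int.land (Int.lor x m) (pow2 n) = 0 then c + 1 else c) 0) = cnt nums n
        have hfe : (fun (c : Int) (x : Int) => if Int.land (Int.lor x m) (pow2 n) = 0 then c + 1 else c)
            = cntStep n := by
          funext c x
          rw [toggle_lemma x m n (hm n (by omega))]
          rfl
        rw [hfe]; rfl
      rw [hcount]
      by_cases hc : (solveCounts nums).getD n 0 ≤ k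
      · simp only [hc, if_true]
        rw [List.map_map]
        have hcomp : ((fun x => Int.lor x (pow2 n)) ∘ fun x => Int.lor x m)
            = fun x => Int.lor x (Int.lor m (pow2 n)) := by
          funext x
          simp only [Function.comp]
          exact int_lor_assoc x m (pow2 n)
        rw [hcomp]
        exact ih (by omega) (k - (solveCounts nums).getD n 0) (Int.lor m (pow2 n))
          (fun j hj => by
            rw [Int.testBit_lor, hm j (by omega), testBit_pow2]
            simp; omega)
      · simp only [hc, if_false]
        exact ih (by omega) k m (fun j hj => hm j (by omega))
    · simp only [hk, if_false]

theorem loops_agree (nums : List Int) (k : Int) :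
    solveLoopA 31 nums k = nums.map (fun x => Int.lor x (solveLoopB 31 (solveCounts nums) k 0)) := by
  have h0 : nums.map (fun x => Int.lor x (0 : Int)) = nums := by
    simp only [int_lor_zero, List.map_id_fun', id]
  have := loop_corr nums 31 (by omega) k 0
    (fun j _ => by
      show (Int.ofNat 0).testBit j = false
      rw [int_testBit_ofNat, Nat.zero_testBit])
  rw [h0] at this
  exact this

-- ===== VERDICT (by name: the statement is the Claim_ definition above) =====
theorem solve_spec : Claim_equal_solve := by
  intro nums k _ _
  unfold Spec_solve solve solve_alt
  rw [loops_agree]
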